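-- pv_equiv track=rewrite | github.com/DataCanvasIO/LMPM | backend/promptmanager/app_prompt/views.py | dealKeyword
-- ===== SOURCE A (Python) =====
-- import operator
--
-- def dealKeyword(keywords, re_data):
--     re_result = []
--     name_contains_keywords = []
--     content_contains_keywords = []
--     for prompt in list(re_data):
--         prompt_name = prompt['name']
--         prompt_content = prompt['prompt']
--         if operator.contains(prompt_name.lower(), keywords.lower()):
--             name_contains_keywords.append(prompt)
--         elif operator.contains(prompt_content.lower(), keywords.lower()):
--             content_contains_keywords.append(prompt)
--     re_result.extend(name_contains_keywords)
--     re_result.extend(content_contains_keywords)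
--     return re_result
-- ===== SOURCE B (Python) =====
-- def dealKeyword(keywords, re_data):
--     kw = keywords.lower()
--     ranked = []
--     for prompt in list(re_data):
--         name = prompt['name']
--         content = prompt['prompt']
--         r = 0 if kw in name.lower() else (1 if kw in content.lower() else 2)
--         ranked.append((r, prompt))
--     ranked.sort(key=lambda t: t[0])  # stable: preserves original order within each rank
--     return [p for r, p in ranked if r < 2]
-- ===== Notes on version B (the rewrite author's own statement) =====
-- stated objective: alternative
-- what changed: Replaces the if/elif two-bucket accumulation loop by a decorate-sort-filter scheme: each prompt is tagged with a match rank (0 = name hit, 1 = content-only hit, 2 = no hit), the tagged list is stably sorted by rank, and tags < 2 are kept; sort stability reproduces A's exact output order.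
import Mathlib
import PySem

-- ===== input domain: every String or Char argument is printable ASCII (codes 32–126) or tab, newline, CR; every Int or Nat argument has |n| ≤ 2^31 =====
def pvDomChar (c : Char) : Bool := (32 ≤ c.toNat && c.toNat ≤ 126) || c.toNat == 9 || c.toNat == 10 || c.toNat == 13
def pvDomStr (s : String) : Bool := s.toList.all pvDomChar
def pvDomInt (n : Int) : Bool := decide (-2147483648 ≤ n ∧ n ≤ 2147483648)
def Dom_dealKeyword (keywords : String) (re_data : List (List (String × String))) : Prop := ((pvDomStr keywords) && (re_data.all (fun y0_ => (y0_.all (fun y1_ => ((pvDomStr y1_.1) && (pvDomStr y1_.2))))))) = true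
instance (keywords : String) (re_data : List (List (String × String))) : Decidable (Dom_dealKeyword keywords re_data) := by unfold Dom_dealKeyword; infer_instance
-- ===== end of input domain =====

-- B replaces A's if/elif two-bucket loop by decorate/stable-sort/filter: tag each prompt with a
-- match rank (0 name, 1 content-only, 2 none), stably sort by rank, keep ranks < 2.

-- prompt['k'] on the dict-as-association-list (first match); KeyError inputs are excluded by Pre_,
-- under which the .getD "" default is never reached.
def pvKey (p : List (String × String)) (k : String) : String :=
  ((PySem.Dict.mk p).get? k).getD ""

-- ===== PORT A =====
def dealKeyword (keywords : String) (re_data : List (List (String × String))) : List (List (String × String)) :=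
  let st := re_data.foldl
    (fun (acc : List (List (String × String)) × List (List (String × String))) prompt =>
      let prompt_name := pvKey prompt "name"
      let prompt_content := pvKey prompt "prompt"
      if PySem.Str.isIn (PySem.Str.lower keywords) (PySem.Str.lower prompt_name) then
        (acc.1 ++ [prompt], acc.2)
      else if PySem.Str.isIn (PySem.Str.lower keywords) (PySem.Str.lower prompt_content) then
        (acc.1, acc.2 ++ [prompt])
      else acc)
    ([], [])
  ([] : List (List (String × String))) ++ st.1 ++ st.2

-- ===== PORT B =====
def dealKeyword_alt (keywords : String) (re_data : List (List (String × String))) : List (List (String × String)) :=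
  let kw := PySem.Str.lower keywords
  let ranked := re_data.foldl
    (fun (acc : List (Int × List (String × String))) prompt =>
      let name := pvKey prompt "name"
      let content := pvKey prompt "prompt"
      let r : Int := if PySem.Str.isIn kw (PySem.Str.lower name) then 0
                     else if PySem.Str.isIn kw (PySem.Str.lower content) then 1 else 2
      acc ++ [(r, prompt)]) []
  let sorted := PySem.List.sorted ranked (fun t => t.1)
  (sorted.filter (fun t => t.1 < 2)).map (fun t => t.2)

-- ===== PRECONDITION & SPEC =====
-- Pre_ excludes exactly the inputs where Python A raises KeyError: a prompt dict missing 'name' or 'prompt'.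
def Pre_dealKeyword (keywords : String) (re_data : List (List (String × String))) : Prop :=
  ∀ p ∈ re_data, (PySem.Dict.mk p).contains "name" = true ∧ (PySem.Dict.mk p).contains "prompt" = true
instance (keywords : String) (re_data : List (List (String × String))) : Decidable (Pre_dealKeyword keywords re_data) := by unfold Pre_dealKeyword; infer_instance
def pvWitness_dealKeyword : String × (List (List (String × String))) :=
  ("ab", [[("name", "drab"), ("prompt", "x")], [("name", "zz"), ("prompt", "AB c")], [("name", "q"), ("prompt", "q")]])

def Spec_dealKeyword (keywords : String) (re_data : List (List (String × String))) (out : List (List (String × String))) : Prop := out = dealKeyword_alt keywords re_data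
instance (keywords : String) (re_data : List (List (String × String))) (out : List (List (String × String))) : Decidable (Spec_dealKeyword keywords re_data out) := by unfold Spec_dealKeyword; infer_instance

-- ===== CLAIM =====
def Claim_equal_dealKeyword : Prop := ∀ (keywords : String) (re_data : List (List (String × String))), Dom_dealKeyword keywords re_data → Pre_dealKeyword keywords re_data → Spec_dealKeyword keywords re_data (dealKeyword keywords re_data)

-- ===== LEMMAS AND PROOFS =====

-- A's fold appends each hit to one of its two buckets: closed form as two filters.
lemma dealKeyword_foldl (kw : String) (l : List (List (String × String)))
    (a c : List (List (String × String))) :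
    l.foldl
      (fun (acc : List (List (String × String)) × List (List (String × String))) prompt =>
        let prompt_name := pvKey prompt "name"
        let prompt_content := pvKey prompt "prompt"
        if PySem.Str.isIn (PySem.Str.lower kw) (PySem.Str.lower prompt_name) then
          (acc.1 ++ [prompt], acc.2)
        else if PySem.Str.isIn (PySem.Str.lower kw) (PySem.Str.lower prompt_content) then
          (acc.1, acc.2 ++ [prompt])
        else acc)
      (a, c)
    = (a ++ l.filter (fun p => PySem.Str.isIn (PySem.Str.lower kw) (PySem.Str.lower (pvKey p "name"))),
       c ++ l.filter (fun p => !PySem.Str.isIn (PySem.Str.lower kw) (PySem.Str.lower (pvKey p "name"))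
                  && PySem.Str.isIn (PySem.Str.lower kw) (PySem.Str.lower (pvKey p "prompt")))) := by
  induction l generalizing a c with
  | nil => simp
  | cons p rest ih =>
    cases hn : PySem.Str.isIn (PySem.Str.lower kw) (PySem.Str.lower (pvKey p "name")) with
    | true =>
      simp only [List.foldl_cons, List.filter_cons, hn, reduceIte, Bool.not_true, Bool.false_and]
      rw [ih]; simp
    | false =>
      cases hc : PySem.Str.isIn (PySem.Str.lower kw) (PySem.Str.lower (pvKey p "prompt")) with
      | true =>
        simp only [List.foldl_cons, List.filter_cons, hn, hc, reduceIte, Bool.not_false,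
          Bool.true_and]
        rw [ih]; simp
      | false =>
        simp only [List.foldl_cons, List.filter_cons, hn, hc, Bool.not_false, Bool.true_and]
        rw [ih]; simp

-- insertBy skips a prefix it is not put before.
lemma insertBy_append_not_before {α : Type} (before : α → α → Bool) (x : α)
    (l1 l2 : List α) (h : ∀ y ∈ l1, before x y = false) :
    PySem.List.insertBy before x (l1 ++ l2) = l1 ++ PySem.List.insertBy before x l2 := by
  induction l1 with
  | nil => simp
  | cons y ys ih =>
    have hy := h y (by simp)
    simp only [List.cons_append, PySem.List.insertBy, hy, Bool.false_eq_true, if_false]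
    rw [ih (fun z hz => h z (by simp [hz]))]

-- Stable sort of a rank-decorated list (ranks in {0,1,2}) is the concatenation of its rank blocks.
lemma sorted_rank3 {α : Type} (xs : List (Int × α))
    (h : ∀ t ∈ xs, t.1 = 0 ∨ t.1 = 1 ∨ t.1 = 2) :
    PySem.List.sorted xs (fun t => t.1)
      = xs.filter (fun t => t.1 == 0) ++ xs.filter (fun t => t.1 == 1)
        ++ xs.filter (fun t => t.1 == 2) := by
  rw [PySem.List.sorted_eq_foldl_insertBy]
  suffices H : ∀ (ys : List (Int × α)) (p : List (Int × α)),
      (∀ t ∈ ys, t.1 = 0 ∨ t.1 = 1 ∨ t.1 = 2) →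
      ys.foldl (fun acc x => PySem.List.insertBy (fun a b => decide (a.1 < b.1)) x acc)
        (p.filter (fun t => t.1 == 0) ++ p.filter (fun t => t.1 == 1)
          ++ p.filter (fun t => t.1 == 2))
      = (p ++ ys).filter (fun t => t.1 == 0) ++ (p ++ ys).filter (fun t => t.1 == 1)
        ++ (p ++ ys).filter (fun t => t.1 == 2) by
    have := H xs [] h
    simpa using this
  intro ys
  induction ys with
  | nil => intro p _; simp
  | cons x rest ih =>
    intro p hall
    have hx := hall x (by simp)
    have hrest : ∀ t ∈ rest, t.1 = 0 ∨ t.1 = 1 ∨ t.1 = 2 := fun t ht => hall t (by simp [ht])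
    have key : PySem.List.insertBy (fun a b => decide (a.1 < b.1)) x
        (p.filter (fun t => t.1 == 0) ++ p.filter (fun t => t.1 == 1)
          ++ p.filter (fun t => t.1 == 2))
      = (p ++ [x]).filter (fun t => t.1 == 0) ++ (p ++ [x]).filter (fun t => t.1 == 1)
        ++ (p ++ [x]).filter (fun t => t.1 == 2) := by
      have m0 : ∀ t ∈ p.filter (fun t : Int × α => t.1 == 0), t.1 = 0 := by
        intro t ht; simpa using (List.of_mem_filter ht)
      have m1 : ∀ t ∈ p.filter (fun t : Int × α => t.1 == 1), t.1 = 1 := by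
        intro t ht; simpa using (List.of_mem_filter ht)
      have m2 : ∀ t ∈ p.filter (fun t : Int × α => t.1 == 2), t.1 = 2 := by
        intro t ht; simpa using (List.of_mem_filter ht)
      rcases hx with h0 | h1 | h2
      · -- rank 0: goes after the 0-block, before the 1/2-blocks
        rw [List.append_assoc,
          insertBy_append_not_before _ _ _ _ (by
            intro y hy; have := m0 y hy; simp [this, h0])]
        have htail : PySem.List.insertBy (fun a b => decide (a.1 < b.1)) x
            (p.filter (fun t => t.1 == 1) ++ p.filter (fun t => t.1 == 2))
            = x :: (p.filter (fun t => t.1 == 1) ++ p.filter (fun t => t.1 == 2)) := by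
          cases htl : p.filter (fun t : Int × α => t.1 == 1) ++ p.filter (fun t : Int × α => t.1 == 2) with
          | nil => simp [PySem.List.insertBy, htl]
          | cons y ys =>
            have hy : y ∈ p.filter (fun t : Int × α => t.1 == 1) ++ p.filter (fun t : Int × α => t.1 == 2) := by
              rw [htl]; simp
            have hy1 : y.1 = 1 ∨ y.1 = 2 := by
              rcases List.mem_append.1 hy with h | h
              · exact Or.inl (m1 y h)
              · exact Or.inr (m2 y h)
            have hb : decide (x.1 < y.1) = true := by
              rcases hy1 with h | h <;> simp [h, h0]
            simp [PySem.List.insertBy, hb]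
        rw [htail]
        simp [List.filter_append, h0]
      · -- rank 1: goes after the 0- and 1-blocks, before the 2-block
        rw [insertBy_append_not_before _ _ _ _ (by
            intro y hy
            rcases List.mem_append.1 hy with h | h
            · have := m0 y h; simp [this, h1]
            · have := m1 y h; simp [this, h1])]
        have htail : PySem.List.insertBy (fun a b => decide (a.1 < b.1)) x
            (p.filter (fun t => t.1 == 2))
            = x :: p.filter (fun t => t.1 == 2) := by
          cases htl : p.filter (fun t : Int × α => t.1 == 2) with
          | nil => simp [PySem.List.insertBy, htl]
          | cons y ys =>
            have hy : y ∈ p.filter (fun t : Int × α => t.1 == 2) := by rw [htl]; simp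
            have := m2 y hy
            have hb : decide (x.1 < y.1) = true := by simp [this, h1]
            simp [PySem.List.insertBy, hb]
        rw [htail]
        simp [List.filter_append, h1]
      · -- rank 2: goes at the very end
        rw [PySem.List.insertBy_of_forall_not_before _ _ _ (by
            intro y hy
            rcases List.mem_append.1 hy with h | h
            · rcases List.mem_append.1 h with h' | h'
              · have := m0 y h'; simp [this, h2]
              · have := m1 y h'; simp [this, h2]
            · have := m2 y h; simp [this, h2])]
        simp [List.filter_append, h2]
    rw [List.foldl_cons, key, ih (p ++ [x]) hrest]
    simp
-- B's append-fold builds exactly the rank-decorated map.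
lemma dealKeyword_alt_fold (kw : String) (l : List (List (String × String)))
    (acc : List (Int × List (String × String))) :
    l.foldl
      (fun (acc : List (Int × List (String × String))) prompt =>
        let name := pvKey prompt "name"
        let content := pvKey prompt "prompt"
        let r : Int := if PySem.Str.isIn kw (PySem.Str.lower name) then 0
                       else if PySem.Str.isIn kw (PySem.Str.lower content) then 1 else 2
        acc ++ [(r, prompt)]) acc
    = acc ++ l.map (fun prompt =>
        ((if PySem.Str.isIn kw (PySem.Str.lower (pvKey prompt "name")) then (0 : Int)
          else if PySem.Str.isIn kw (PySem.Str.lower (pvKey prompt "prompt")) then 1 else 2),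
         prompt)) := by
  induction l generalizing acc with
  | nil => simp
  | cons p rest ih => simp only [List.foldl_cons, List.map_cons, ih]; simp

-- filtering a decorated list and projecting = filtering the raw list.
lemma filter_map_decor {α : Type} (rk : α → Int) (c : Int × α → Bool) (l : List α) :
    ((l.map (fun p => (rk p, p))).filter c).map (fun t => t.2)
    = l.filter (fun p => c (rk p, p)) := by
  induction l with
  | nil => simp
  | cons p rest ih =>
    simp only [List.map_cons, List.filter_cons]
    by_cases h : c (rk p, p) = true
    · simp [h, ih]
    · simp only [h] at *; simp [h, ih]

-- ===== VERDICT =====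
theorem dealKeyword_spec : Claim_equal_dealKeyword := by
  intro keywords re_data _ _
  unfold Spec_dealKeyword dealKeyword dealKeyword_alt
  rw [dealKeyword_foldl]
  simp only [List.nil_append]
  rw [dealKeyword_alt_fold]
  simp only [List.nil_append]
  set rk : List (String × String) → Int := fun prompt =>
    if PySem.Str.isIn (PySem.Str.lower keywords) (PySem.Str.lower (pvKey prompt "name")) then (0 : Int)
    else if PySem.Str.isIn (PySem.Str.lower keywords) (PySem.Str.lower (pvKey prompt "prompt")) then 1 else 2
    with hrk
  have hranks : ∀ t ∈ re_data.map (fun prompt => (rk prompt, prompt)),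
      t.1 = 0 ∨ t.1 = 1 ∨ t.1 = 2 := by
    intro t ht
    rcases List.mem_map.1 ht with ⟨p, _, rfl⟩
    simp only [hrk]
    split_ifs <;> simp
  rw [sorted_rank3 _ hranks]
  simp only [List.filter_append, List.map_append, List.filter_filter, filter_map_decor]
  have e0 : re_data.filter (fun p => decide (rk p < 2) && (rk p == 0))
      = re_data.filter (fun p => PySem.Str.isIn (PySem.Str.lower keywords) (PySem.Str.lower (pvKey p "name"))) := by
    apply List.filter_congr
    intro p _
    simp only [hrk]
    by_cases hn : PySem.Str.isIn (PySem.Str.lower keywords) (PySem.Str.lower (pvKey p "name")) = true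
    · simp only [hn, if_true]; rfl
    · simp only [Bool.not_eq_true] at hn
      by_cases hc : PySem.Str.isIn (PySem.Str.lower keywords) (PySem.Str.lower (pvKey p "prompt")) = true
      · simp only [hn, hc, Bool.false_eq_true, if_false, if_true]; rfl
      · simp only [Bool.not_eq_true] at hc
        simp only [hn, hc, Bool.false_eq_true, if_false]; rfl
  have e1 : re_data.filter (fun p => decide (rk p < 2) && (rk p == 1))
      = re_data.filter (fun p => !PySem.Str.isIn (PySem.Str.lower keywords) (PySem.Str.lower (pvKey p "name"))
            && PySem.Str.isIn (PySem.Str.lower keywords) (PySem.Str.lower (pvKey p "prompt"))) := by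
    apply List.filter_congr
    intro p _
    simp only [hrk]
    by_cases hn : PySem.Str.isIn (PySem.Str.lower keywords) (PySem.Str.lower (pvKey p "name")) = true
    · simp only [hn, if_true]; rfl
    · simp only [Bool.not_eq_true] at hn
      by_cases hc : PySem.Str.isIn (PySem.Str.lower keywords) (PySem.Str.lower (pvKey p "prompt")) = true
      · simp only [hn, hc, Bool.false_eq_true, if_false, if_true]; rfl
      · simp only [Bool.not_eq_true] at hc
        simp only [hn, hc, Bool.false_eq_true, if_false]; rfl
  have e2 : re_data.filter (fun p => decide (rk p < 2) && (rk p == 2)) = [] := by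
    apply List.filter_eq_nil_iff.2
    intro p _
    simp only [hrk]
    split_ifs <;> simp
  rw [e0, e1, e2]
  simp
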